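-- pv_equiv track=rewrite | github.com/sburnap/Advent2021 | Day17/Day17.py | positiony
-- ===== SOURCE A (Python) =====
-- from typing import Tuple, Generator, List
--
-- def positiony(
--     position: int, velocity: int, minimum: int, maximum: int
-- ) -> Generator[int, None, None]:
--     step = 0
--     while position >= minimum:
--         position += velocity
--         if position >= minimum and position <= maximum:
--             yield step, position
--         velocity -= 1
--         step += 1
-- ===== SOURCE B (Python) =====
-- def positiony(position, velocity, minimum, maximum):
--     # closed-form position per step + exponential search for the horizon,
--     # then a single filtering pass (alternative to A's stateful simulation)
--     if position < minimum:
--         return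
--     def p(s):
--         return position + (s + 1) * velocity - s * (s + 1) // 2
--     n = velocity + 1 if velocity > 0 else 1
--     while p(n) >= minimum:
--         n *= 2
--     for s in range(n):
--         q = p(s)
--         if minimum <= q <= maximum:
--             yield s, q
-- ===== Notes on version B (the rewrite author's own statement) =====
-- stated objective: alternative
-- what changed: B replaces A's stateful step-by-step simulation (mutating position/velocity/step) by a closed-form position formula p(s)=position+(s+1)*velocity-s*(s+1)//2, an exponential-doubling search for a horizon n past which the projectile stays below minimum, and a single filtering pass over range(n).
import Mathlib
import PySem

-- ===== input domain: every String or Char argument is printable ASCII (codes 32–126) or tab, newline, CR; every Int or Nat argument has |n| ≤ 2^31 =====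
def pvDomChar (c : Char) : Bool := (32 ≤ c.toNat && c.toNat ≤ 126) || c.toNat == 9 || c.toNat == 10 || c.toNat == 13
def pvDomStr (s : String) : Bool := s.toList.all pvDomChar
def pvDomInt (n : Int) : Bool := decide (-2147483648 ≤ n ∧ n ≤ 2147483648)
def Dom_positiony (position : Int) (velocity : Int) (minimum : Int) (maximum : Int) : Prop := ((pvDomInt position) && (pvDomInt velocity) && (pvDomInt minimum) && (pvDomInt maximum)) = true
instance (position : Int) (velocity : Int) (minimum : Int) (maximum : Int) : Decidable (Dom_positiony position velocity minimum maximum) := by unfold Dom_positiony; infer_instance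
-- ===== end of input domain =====

-- B replaces A's stateful step-by-step simulation by a closed-form position formula,
-- an exponential search for a horizon past the target, and one filtering pass (objective: alternative).

-- ===== PORT A =====
-- the while loop of A (acc accumulates the yielded pairs), well-founded recursion on
-- (velocity, position) lexicographically
def positionyLoop (minimum : Int) (maximum : Int) (acc : List (Int × Int)) (position : Int)
    (velocity : Int) (step : Int) : List (Int × Int) :=
  if minimum ≤ position then
    positionyLoop minimum maximum
      (acc ++ (if minimum ≤ position + velocity ∧ position + velocity ≤ maximum
        then [(step, position + velocity)] else []))
      (position + velocity) (velocity - 1) (step + 1)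
  else acc
termination_by ((velocity + 1).toNat, (position - minimum + 1).toNat)
decreasing_by
  by_cases h : 0 ≤ velocity
  · exact Prod.Lex.left _ _ (by omega)
  · have e : (velocity - 1 + 1).toNat = (velocity + 1).toNat := by omega
    rw [e]
    exact Prod.Lex.right _ (by omega)

def positiony (position : Int) (velocity : Int) (minimum : Int) (maximum : Int) : List (Int × Int) :=
  positionyLoop minimum maximum [] position velocity 0

-- ===== PORT B =====
-- position after step s, in closed form (s*(s+1)//2 is Python floor division)
def pformB (position : Int) (velocity : Int) (s : Int) : Int :=
  position + (s + 1) * velocity - PySem.Int.floordiv (s * (s + 1)) 2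

-- key fact for both the doubling loop's termination and its correctness
theorem pformB_double_lt (position velocity n : Int) (hv : velocity < n) (hn : 0 < n) :
    pformB position velocity (2 * n) < pformB position velocity n := by
  unfold pformB
  obtain ⟨t1, ht1⟩ : ∃ t, n * (n + 1) = 2 * t := by
    rcases Int.even_mul_succ_self n with ⟨t, ht⟩; exact ⟨t, by omega⟩
  obtain ⟨t2, ht2⟩ : ∃ t, 2 * n * (2 * n + 1) = 2 * t := by
    exact ⟨n * (2 * n + 1), by ring⟩
  rw [ht1, ht2, PySem.Int.floordiv_eq_ediv_of_pos (by omega),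
      PySem.Int.floordiv_eq_ediv_of_pos (by omega),
      Int.mul_ediv_cancel_left _ (by omega), Int.mul_ediv_cancel_left _ (by omega)]
  nlinarith [mul_pos hn (show (0:Int) < n + 3 - (2 * velocity - 2 * n) by omega)]

-- the `while p(n) >= minimum: n *= 2` loop of B (hn is only a totality guard)
def altLoopN (position : Int) (velocity : Int) (minimum : Int) (n : Int)
    (hn : velocity < n ∧ 0 < n) : Int :=
  if minimum ≤ pformB position velocity n then
    altLoopN position velocity minimum (2 * n) (by omega)
  else n
termination_by (pformB position velocity n - minimum + 1).toNat
decreasing_by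
  have := pformB_double_lt position velocity n hn.1 hn.2
  omega

def positiony_alt (position : Int) (velocity : Int) (minimum : Int) (maximum : Int) :
    List (Int × Int) :=
  if position < minimum then []
  else
    (PySem.List.pyRange 0
      (altLoopN position velocity minimum (if 0 < velocity then velocity + 1 else 1)
        (by split <;> omega)) 1).filterMap (fun s =>
      if minimum ≤ pformB position velocity s ∧ pformB position velocity s ≤ maximum
        then some (s, pformB position velocity s) else none)

-- ===== PRECONDITION & SPEC =====
def Spec_positiony (position : Int) (velocity : Int) (minimum : Int) (maximum : Int) (out : List (Int × Int)) : Prop := out = positiony_alt position velocity minimum maximum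
instance (position : Int) (velocity : Int) (minimum : Int) (maximum : Int) (out : List (Int × Int)) : Decidable (Spec_positiony position velocity minimum maximum out) := by unfold Spec_positiony; infer_instance

-- ===== CLAIM (what is proved, stated in full; the proofs are below) =====
def Claim_equal_positiony : Prop := ∀ (position : Int) (velocity : Int) (minimum : Int) (maximum : Int), Dom_positiony position velocity minimum maximum → Spec_positiony position velocity minimum maximum (positiony position velocity minimum maximum)

-- ===== LEMMAS AND PROOFS =====

-- proof-side non-accumulating form of A's loop
def loopP (minimum : Int) (maximum : Int) (position : Int) (velocity : Int) (step : Int) :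
    List (Int × Int) :=
  if minimum ≤ position then
    (if minimum ≤ position + velocity ∧ position + velocity ≤ maximum
      then [(step, position + velocity)] else []) ++
      loopP minimum maximum (position + velocity) (velocity - 1) (step + 1)
  else []
termination_by ((velocity + 1).toNat, (position - minimum + 1).toNat)
decreasing_by
  by_cases h : 0 ≤ velocity
  · exact Prod.Lex.left _ _ (by omega)
  · have e : (velocity - 1 + 1).toNat = (velocity + 1).toNat := by omega
    rw [e]
    exact Prod.Lex.right _ (by omega)

theorem positionyLoop_eq_loopP (minimum maximum : Int) (acc : List (Int × Int))
    (position velocity step : Int) :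
    positionyLoop minimum maximum acc position velocity step =
      acc ++ loopP minimum maximum position velocity step := by
  induction acc, position, velocity, step using positionyLoop.induct minimum maximum with
  | case1 acc position velocity step hge ih =>
      simp only [dite_eq_ite] at ih
      rw [positionyLoop.eq_def, if_pos hge, loopP.eq_def, if_pos hge, ih, List.append_assoc]
  | case2 acc position velocity step hlt =>
      rw [positionyLoop.eq_def, if_neg hlt, loopP.eq_def, if_neg hlt, List.append_nil]

-- proof-side abstract trajectory: position after k iterations of A's loop
def Aseq (position : Int) (velocity : Int) : Nat → Int
  | 0 => position
  | k + 1 => Aseq position velocity k + (velocity - k)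

theorem two_mul_Aseq (p v : Int) (k : Nat) :
    2 * Aseq p v k = 2 * p + 2 * (k : Int) * v - (k : Int) * ((k : Int) - 1) := by
  induction k with
  | zero => simp [Aseq]
  | succ k ih =>
      have : Aseq p v (k + 1) = Aseq p v k + (v - k) := rfl
      rw [this]
      push_cast
      push_cast at ih
      nlinarith [ih]

theorem pformB_eq (p v : Int) (s : Nat) :
    pformB p v (s : Int) = Aseq p v (s + 1) := by
  obtain ⟨t, ht⟩ : ∃ t, (s : Int) * ((s : Int) + 1) = 2 * t := by
    rcases Int.even_mul_succ_self (s : Int) with ⟨t, h⟩; exact ⟨t, by omega⟩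
  have h2 := two_mul_Aseq p v (s + 1)
  unfold pformB
  rw [ht, PySem.Int.floordiv_eq_ediv_of_pos (by omega), Int.mul_ediv_cancel_left _ (by omega)]
  push_cast at h2 ⊢
  nlinarith [h2, ht]

theorem Aseq_descent (p v : Int) (k j : Nat) (h : v < (k : Int)) :
    Aseq p v (k + j) ≤ Aseq p v k - j := by
  induction j with
  | zero => simp
  | succ j ih =>
      have e : Aseq p v (k + (j + 1)) = Aseq p v (k + j) + (v - ((k + j : Nat) : Int)) := rfl
      rw [e]
      push_cast
      push_cast at ih
      omega

-- the doubling loop returns a horizon beyond which the closed-form position is < minimum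
theorem altLoopN_spec (p v m : Int) :
    ∀ N (n : Int) (hn : v < n ∧ 0 < n), (pformB p v n - m + 1).toNat ≤ N →
      v < altLoopN p v m n hn ∧ 0 < altLoopN p v m n hn ∧
        pformB p v (altLoopN p v m n hn) < m := by
  intro N
  induction N with
  | zero =>
      intro n hn hle
      rw [altLoopN.eq_def]
      split
      · omega
      · exact ⟨hn.1, hn.2, by omega⟩
  | succ N ih =>
      intro n hn hle
      rw [altLoopN.eq_def]
      split
      · have hd := pformB_double_lt p v n hn.1 hn.2
        exact ih (2 * n) (by omega) (by omega)
      · exact ⟨hn.1, hn.2, by omega⟩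

theorem horizon_bound (p v m : Int) (nstar : Int) (h1 : v < nstar) (h2 : 0 < nstar)
    (h3 : pformB p v nstar < m) :
    ∀ s : Nat, nstar ≤ (s : Int) → Aseq p v (s + 1) < m := by
  intro s hs
  set k := nstar.toNat with hk
  have hks : (k : Int) = nstar := by omega
  have hA : Aseq p v (k + 1) < m := by
    rw [← pformB_eq p v k, hks]; exact h3
  have hj : ∃ j : Nat, s + 1 = (k + 1) + j := ⟨s - k, by omega⟩
  obtain ⟨j, hj⟩ := hj
  have := Aseq_descent p v (k + 1) j (by push_cast; omega)
  rw [hj]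
  omega

-- main simulation: A's loop from state k equals the filter of closed-form positions on [k, nstar)
theorem loopA_sim (p v mn mx : Int) (nstar : Int)
    (hb : ∀ s : Nat, nstar ≤ (s : Int) → Aseq p v (s + 1) < mn) :
    ∀ m : Nat, ∀ k : Nat, (k : Int) + m = nstar →
      (mn ≤ Aseq p v k ∨ ∀ s : Nat, k ≤ s → Aseq p v (s + 1) < mn) →
      loopP mn mx (Aseq p v k) (v - k) k =
        (PySem.List.pyRange k nstar 1).filterMap (fun s =>
          if mn ≤ pformB p v s ∧ pformB p v s ≤ mx
            then some (s, pformB p v s) else none) := by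
  intro m
  induction m with
  | zero =>
      intro k hk hH
      have hrange : PySem.List.pyRange (k : Int) nstar 1 = [] :=
        PySem.List.pyRange_one_eq_nil (by omega)
      rw [hrange]
      by_cases hge : mn ≤ Aseq p v k
      · -- one more iteration that yields nothing, then exit
        have hk1 : Aseq p v (k + 1) < mn := hb k (by omega)
        have hstep : Aseq p v k + (v - (k : Int)) = Aseq p v (k + 1) := rfl
        rw [loopP.eq_def, if_pos hge, hstep, if_neg (by omega),
          loopP.eq_def, if_neg (by omega)]
        simp
      · rw [loopP.eq_def, if_neg hge]
        rfl
  | succ m ih =>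
      intro k hk hH
      have hkn : (k : Int) < nstar := by omega
      have hstep : Aseq p v k + (v - (k : Int)) = Aseq p v (k + 1) := rfl
      have hq : pformB p v (k : Int) = Aseq p v (k + 1) := pformB_eq p v k
      by_cases hge : mn ≤ Aseq p v k
      · rw [PySem.List.pyRange_one_cons hkn, loopP.eq_def, if_pos hge, hstep,
          List.filterMap_cons]
        have hrec : loopP mn mx (Aseq p v (k + 1)) (v - (k : Int) - 1) ((k : Int) + 1) =
            (PySem.List.pyRange ((k : Int) + 1) nstar 1).filterMap (fun s =>
              if mn ≤ pformB p v s ∧ pformB p v s ≤ mx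
                then some (s, pformB p v s) else none) := by
          have e1 : v - (k : Int) - 1 = v - ((k + 1 : Nat) : Int) := by push_cast; omega
          have e2 : (k : Int) + 1 = ((k + 1 : Nat) : Int) := by push_cast; omega
          rw [e1, e2]
          apply ih (k + 1) (by push_cast; omega)
          by_cases hnext : mn ≤ Aseq p v (k + 1)
          · exact Or.inl hnext
          · refine Or.inr (fun s hs => ?_)
            -- velocity component is already negative: the trajectory only descends
            have hvk : v - (k : Int) < 0 := by omega
            obtain ⟨j, hj⟩ : ∃ j : Nat, s + 1 = (k + 1) + j := ⟨s - k, by omega⟩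
            have hd := Aseq_descent p v (k + 1) j (by push_cast; omega)
            rw [hj]
            push_cast at hd
            omega
        rw [hrec, hq]
        by_cases hyield : mn ≤ Aseq p v (k + 1) ∧ Aseq p v (k + 1) ≤ mx
        · rw [if_pos hyield, if_pos hyield]
          rfl
        · rw [if_neg hyield, if_neg hyield]
          rfl
      · -- loop exits at once: no later step is in range either, both sides are empty
        have hall := hH.resolve_left hge
        rw [loopP.eq_def, if_neg hge]
        symm
        rw [List.filterMap_eq_nil_iff]
        intro x hx
        have hxr := (PySem.List.mem_pyRange_one).1 hx
        have hxk : x = ((x.toNat : Nat) : Int) := by omega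
        rw [hxk, pformB_eq p v x.toNat, if_neg (by
          have := hall x.toNat (by omega); omega)]

-- ===== VERDICT (by name: the statement is the Claim_ definition above) =====
theorem positiony_spec : Claim_equal_positiony := by
  intro position velocity minimum maximum _
  unfold Spec_positiony positiony positiony_alt
  by_cases hp : position < minimum
  · rw [if_pos hp, positionyLoop_eq_loopP, List.nil_append, loopP.eq_def, if_neg (by omega)]
  · rw [if_neg hp]
    have hpf : velocity < (if 0 < velocity then velocity + 1 else 1) ∧
        0 < (if 0 < velocity then velocity + 1 else 1) := by split <;> omega
    obtain ⟨h1, h2, h3⟩ := altLoopN_spec position velocity minimum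
      (pformB position velocity (if 0 < velocity then velocity + 1 else 1) - minimum + 1).toNat
      (if 0 < velocity then velocity + 1 else 1) hpf le_rfl
    set nst := altLoopN position velocity minimum (if 0 < velocity then velocity + 1 else 1) hpf with hnst
    have hb := horizon_bound position velocity minimum nst h1 h2 h3
    have hsim := loopA_sim position velocity minimum maximum nst hb nst.toNat 0 (by omega)
      (Or.inl (by simpa [Aseq] using not_lt.1 hp))
    rw [positionyLoop_eq_loopP, List.nil_append]
    simpa [Aseq] using hsim
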